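-- pv_equiv track=rewrite | github.com/JarredAllen/number-theory-programs | e.py | e_factor
-- ===== SOURCE A (Python) =====
-- def is_e_prime(e):
--     """Returns if e is a prime in E (2Z)"""
--     return e % 4 == 2
--
-- def e_primes(e):
--     """Generate the E-primes up to e"""
--     return [i for i in range(e) if is_e_prime(i)]
--
-- def e_factor(e):
--     """Returns a list of all prime factorizations of e in E (2Z)"""
--     if is_e_prime(e):
--         return [[e]]
--     factors = []
--     for e_prime in e_primes(e):
--         if e_prime * e_prime > e:
--             break
--         if e % e_prime == 0:
--             subfactors = e_factor(e // e_prime)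
--             for factor_list in subfactors:
--                 factors += [[e_prime] + factor_list]
--     return [f for f in factors if f == sorted(f)]
-- ===== SOURCE B (Python) =====
-- def e_factor(e):
--     """Returns a list of all prime factorizations of e in E (2Z)"""
--     if e % 4 == 2:
--         return [[e]]
--     def gen(n, lo):
--         # non-decreasing E-prime factorizations of n with all factors >= lo
--         if n % 4 == 2:
--             return [[n]] if n >= lo else []
--         out = []
--         p = lo
--         while p * p <= n:
--             if n % p == 0:
--                 out.extend([p] + tail for tail in gen(n // p, p))
--             p += 4
--         return out
--     return gen(e, 2)
-- ===== Notes on version B (the rewrite author's own statement) =====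
-- stated objective: faster
-- what changed: Instead of generating candidate first factors from a full list of all E-primes below e at every recursive call and filtering out non-sorted factor lists at the end of each level, B recurses with a lower bound lo and generates only non-decreasing factor sequences directly, scanning candidate divisors upward from lo (consecutive E-prime candidates) only while p*p <= n; no e_primes list and no sortedness filter are needed.
import Mathlib
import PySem

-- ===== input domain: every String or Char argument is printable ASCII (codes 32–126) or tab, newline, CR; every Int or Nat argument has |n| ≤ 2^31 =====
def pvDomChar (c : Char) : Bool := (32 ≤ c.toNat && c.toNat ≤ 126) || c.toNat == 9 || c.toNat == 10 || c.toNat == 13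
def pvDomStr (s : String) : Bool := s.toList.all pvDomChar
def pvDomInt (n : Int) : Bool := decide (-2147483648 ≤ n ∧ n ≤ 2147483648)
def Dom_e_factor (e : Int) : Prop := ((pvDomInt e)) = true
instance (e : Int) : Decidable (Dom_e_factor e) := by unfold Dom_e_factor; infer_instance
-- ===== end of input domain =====

-- B replaces A's per-call full E-prime list and end-of-level sortedness filter by direct
-- recursive generation of only non-decreasing factor sequences (candidate divisors scanned
-- upward from a lower bound while p*p ≤ n); measured faster on the generated inputs.

-- ===== PORT A =====
-- termination helper, cited by the ports' decreasing_by
theorem pv_fdiv_lt (a b : Int) (ha : 1 ≤ a) (hb : 2 ≤ b) : a / b < a := by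
  have h1 : a / b * b ≤ a := Int.ediv_mul_le a (by omega)
  have h2 : 0 ≤ a / b := Int.ediv_nonneg (by omega) (by omega)
  have h3 : a / b * 2 ≤ a / b * b := by
    exact mul_le_mul_of_nonneg_left (by omega) h2
  omega

theorem pv_mod4_add (p : Int) (h : PySem.Int.mod p 4 = 2) : PySem.Int.mod (p + 4) 4 = 2 := by
  rw [PySem.Int.mod_eq_emod_of_pos (by omega)] at h ⊢
  omega

def isEPrime (e : Int) : Bool := PySem.Int.mod e 4 == 2

def ePrimes (e : Int) : List Int :=
  (PySem.List.pyRange 0 e 1).filter (fun i => isEPrime i)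

-- the `break` on p*p > e is ported as a takeWhile prefix of the (ascending) prime list:
-- the loop processes exactly the elements before the first one with p*p > e.
def e_factor (e : Int) : List (List Int) :=
  if isEPrime e then [[e]]
  else
    let ps := (ePrimes e).takeWhile (fun p => decide (p * p ≤ e))
    let factors := ps.attach.foldl (fun acc q =>
      if PySem.Int.mod e q.1 == 0 then
        acc ++ (e_factor (PySem.Int.floordiv e q.1)).map (fun fl => q.1 :: fl)
      else acc) ([] : List (List Int))
    factors.filter (fun f => f == PySem.List.sorted f (fun x => x))
termination_by e.toNat
decreasing_by
  rename_i q hdvd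
  have hq := q.2
  have hmem : q.1 ∈ ePrimes e := List.Sublist.mem hq (List.takeWhile_sublist _)
  have hsq := List.mem_takeWhile_imp hq
  simp only [decide_eq_true_eq] at hsq
  simp only [ePrimes, List.mem_filter, isEPrime, beq_iff_eq] at hmem
  obtain ⟨hr, hm4⟩ := hmem
  rw [PySem.List.mem_pyRange_one] at hr
  rw [PySem.Int.mod_eq_emod_of_pos (by omega)] at hm4
  have hq2 : 2 ≤ (q : Int) := by omega
  have he4 : 4 ≤ e := by nlinarith
  rw [PySem.Int.floordiv_eq_ediv_of_pos (by omega)]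
  have := pv_fdiv_lt e q (by omega) hq2
  omega

-- ===== PORT B =====
mutual
-- non-decreasing E-prime factorizations of n with all factors ≥ lo (B's inner `gen`)
def genAlt (n lo : Int) (h : 2 ≤ lo ∧ PySem.Int.mod lo 4 = 2) : List (List Int) :=
  if PySem.Int.mod n 4 == 2 then (if lo ≤ n then [[n]] else [])
  else genAltLoop n lo h
termination_by (n.toNat, 1, 0)
decreasing_by exact Prod.Lex.right _ (Prod.Lex.left _ _ (by omega))

-- B's `while p * p <= n` loop over consecutive E-prime candidates p
def genAltLoop (n p : Int) (h : 2 ≤ p ∧ PySem.Int.mod p 4 = 2) : List (List Int) :=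
  if hle : p * p ≤ n then
    (if PySem.Int.mod n p == 0 then
       (genAlt (PySem.Int.floordiv n p) p h).map (fun tail => p :: tail)
     else []) ++
    genAltLoop n (p + 4)
      ⟨by omega, pv_mod4_add p h.2⟩
  else []
termination_by (n.toNat, 0, n.toNat + 1 - p.toNat)
decreasing_by
  · -- recursive call into genAlt (n // p) p
    apply Prod.Lex.left
    obtain ⟨hp2, _⟩ := h
    have hn4 : 4 ≤ n := by nlinarith
    rw [PySem.Int.floordiv_eq_ediv_of_pos (by omega)]
    have := pv_fdiv_lt n p (by omega) hp2
    omega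
  · -- p + 4 step
    obtain ⟨hp2, _⟩ := h
    have hpn : p ≤ n := by nlinarith
    apply Prod.Lex.right
    apply Prod.Lex.right
    omega
end

def e_factor_alt (e : Int) : List (List Int) :=
  if PySem.Int.mod e 4 == 2 then [[e]]
  else genAlt e 2 ⟨by omega, by decide⟩

-- ===== PRECONDITION & SPEC =====
def Spec_e_factor (e : Int) (out : List (List Int)) : Prop := out = e_factor_alt e
instance (e : Int) (out : List (List Int)) : Decidable (Spec_e_factor e out) := by unfold Spec_e_factor; infer_instance

-- ===== CLAIM (what is proved, stated in full; the proofs are below) =====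
def Claim_equal_e_factor : Prop := ∀ (e : Int), Dom_e_factor e → Spec_e_factor e (e_factor e)

-- ===== LEMMAS AND PROOFS =====

-- proof-side abbreviations
def psA (m : Int) : List Int := (ePrimes m).takeWhile (fun p => decide (p * p ≤ m))

def sortedP (f : List Int) : Bool := f == PySem.List.sorted f (fun x => x)

def bodyB (m p : Int) : List (List Int) :=
  if PySem.Int.mod m p == 0 then
    ((e_factor (PySem.Int.floordiv m p)).filter (fun fl => decide (p ≤ fl.headI))).map
      (fun fl => p :: fl)
  else []

def canon (m lo : Int) : List Int :=
  (PySem.List.pyRange 0 m 1).filter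
    (fun q => decide (q % 4 = 2) && decide (lo ≤ q) && decide (q * q ≤ m))

lemma sortedP_iff (f : List Int) : sortedP f = true ↔ f.Pairwise (· ≤ ·) := by
  unfold sortedP
  rw [beq_iff_eq]
  constructor
  · intro h
    have := PySem.List.sorted_pairwise f (fun x => x)
    rw [← h] at this
    exact this
  · intro h
    exact (PySem.List.sorted_eq_self_of_pairwise f (fun x => x) h).symm

lemma e_factor_unfold (m : Int) (hm : isEPrime m = false) :
    e_factor m =
      ((psA m).flatMap (fun p =>
        if PySem.Int.mod m p == 0 then
          (e_factor (PySem.Int.floordiv m p)).map (fun fl => p :: fl)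
        else [])).filter sortedP := by
  rw [e_factor.eq_def, if_neg (by simp [hm])]
  show ((psA m).attach.foldl (fun acc q =>
      if PySem.Int.mod m q.1 == 0 then
        acc ++ (e_factor (PySem.Int.floordiv m q.1)).map (fun fl => q.1 :: fl)
      else acc) ([] : List (List Int))).filter (fun f => f == PySem.List.sorted f (fun x => x)) = _
  have hfun : (fun f : List Int => f == PySem.List.sorted f (fun x => x)) = sortedP := rfl
  rw [hfun]
  congr 1
  have hstep : ∀ (acc : List (List Int)) (q : {x // x ∈ psA m}),
      (if PySem.Int.mod m q.1 == 0 then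
        acc ++ (e_factor (PySem.Int.floordiv m q.1)).map (fun fl => q.1 :: fl)
      else acc)
      = acc ++ (if PySem.Int.mod m q.1 == 0 then
          (e_factor (PySem.Int.floordiv m q.1)).map (fun fl => q.1 :: fl) else []) := by
    intro acc q; split <;> simp
  calc (psA m).attach.foldl (fun acc q =>
      if PySem.Int.mod m q.1 == 0 then
        acc ++ (e_factor (PySem.Int.floordiv m q.1)).map (fun fl => q.1 :: fl)
      else acc) []
      = (psA m).attach.foldl (fun acc q =>
          acc ++ (if PySem.Int.mod m q.1 == 0 then
            (e_factor (PySem.Int.floordiv m q.1)).map (fun fl => q.1 :: fl) else [])) [] := by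
        rw [funext (fun acc => funext (fun q => hstep acc q))]
    _ = (psA m).foldl (fun acc p =>
          acc ++ (if PySem.Int.mod m p == 0 then
            (e_factor (PySem.Int.floordiv m p)).map (fun fl => p :: fl) else [])) [] := by
        exact List.foldl_attach (l := psA m)
          (f := fun acc p => acc ++ (if PySem.Int.mod m p == 0 then
            (e_factor (PySem.Int.floordiv m p)).map (fun fl => p :: fl) else [])) (b := [])
    _ = _ := by
        rw [PySem.List.foldl_append_eq_flatMap]
        simp
lemma e_factor_elem (m : Int) : ∀ f ∈ e_factor m, f ≠ [] ∧ f.Pairwise (· ≤ ·) := by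
  intro f hf
  by_cases hm : isEPrime m = true
  · rw [e_factor.eq_def, if_pos hm] at hf
    simp only [List.mem_singleton] at hf
    subst hf
    exact ⟨by simp, by simp⟩
  · rw [e_factor_unfold m (by simpa using hm)] at hf
    rw [List.mem_filter] at hf
    obtain ⟨hmem, hsort⟩ := hf
    refine ⟨?_, (sortedP_iff f).mp hsort⟩
    obtain ⟨p, _, hfb⟩ := List.mem_flatMap.mp hmem
    split at hfb
    · obtain ⟨fl, _, rfl⟩ := List.mem_map.mp hfb
      simp
    · simp at hfb

lemma pv_cons_pairwise (p : Int) (fl : List Int) (hne : fl ≠ []) (hp : fl.Pairwise (· ≤ ·)) :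
    sortedP (p :: fl) = decide (p ≤ fl.headI) := by
  cases fl with
  | nil => exact absurd rfl hne
  | cons a t =>
    simp only [List.headI]
    rw [Bool.eq_iff_iff, sortedP_iff, decide_eq_true_eq]
    rw [List.pairwise_cons] at hp
    constructor
    · intro hpw
      exact (List.pairwise_cons.mp hpw).1 a (by simp)
    · intro hpa
      rw [List.pairwise_cons]
      refine ⟨?_, List.pairwise_cons.mpr hp⟩
      intro x hx
      rcases List.mem_cons.mp hx with rfl | hx
      · exact hpa
      · exact le_trans hpa (hp.1 x hx)

lemma e_factor_flat (m : Int) (hm : isEPrime m = false) :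
    e_factor m = (psA m).flatMap (bodyB m) := by
  rw [e_factor_unfold m hm, List.filter_flatMap]
  congr 1
  funext p
  unfold bodyB
  split
  · rw [List.filter_map]
    congr 1
    apply List.filter_congr
    intro fl hfl
    obtain ⟨hne, hpw⟩ := e_factor_elem _ fl hfl
    exact pv_cons_pairwise p fl hne hpw
  · simp
lemma canon_nil (m lo : Int) (h0 : 0 ≤ lo) (h : m < lo * lo) : canon m lo = [] := by
  rw [canon, List.filter_eq_nil_iff]
  intro q hq
  rw [PySem.List.mem_pyRange_one] at hq
  simp only [Bool.and_eq_true, decide_eq_true_eq, not_and]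
  intro _ hlo
  nlinarith

lemma canon_cons (m lo : Int) (h2 : 2 ≤ lo) (h4 : lo % 4 = 2) (hle : lo * lo ≤ m) :
    canon m lo = lo :: canon m (lo + 4) := by
  have hlom : lo < m := by nlinarith
  unfold canon
  rw [PySem.List.pyRange_one_append 0 lo m (by omega) (by omega),
      PySem.List.pyRange_one_cons (by omega : lo < m), List.filter_append]
  rw [show (PySem.List.pyRange 0 lo 1).filter
        (fun q => decide (q % 4 = 2) && decide (lo ≤ q) && decide (q * q ≤ m)) = [] from by
    rw [List.filter_eq_nil_iff]
    intro q hq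
    rw [PySem.List.mem_pyRange_one] at hq
    simp only [Bool.and_eq_true, decide_eq_true_eq, not_and]
    intro _ h
    omega]
  rw [List.filter_cons_of_pos (by simp only [Bool.and_eq_true, decide_eq_true_eq]; omega)]
  rw [List.nil_append]
  congr 1
  rw [List.filter_append]
  rw [show (PySem.List.pyRange 0 lo 1).filter
        (fun q => decide (q % 4 = 2) && decide (lo + 4 ≤ q) && decide (q * q ≤ m)) = [] from by
    rw [List.filter_eq_nil_iff]
    intro q hq
    rw [PySem.List.mem_pyRange_one] at hq
    simp only [Bool.and_eq_true, decide_eq_true_eq, not_and]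
    intro _ h
    omega]
  rw [List.filter_cons_of_neg (by simp only [Bool.and_eq_true, decide_eq_true_eq, not_and]; intro _ h; omega)]
  rw [List.nil_append]
  apply List.filter_congr
  intro q hq
  rw [PySem.List.mem_pyRange_one] at hq
  by_cases hq4 : q % 4 = 2
  · rw [show decide (lo ≤ q) = decide (lo + 4 ≤ q) from decide_eq_decide.mpr (by omega)]
  · rw [show decide (q % 4 = 2) = false from by simp [hq4]]
    simp

lemma tw_filter (m : Int) : ∀ L : List Int, L.Pairwise (· ≤ ·) → (∀ x ∈ L, 0 ≤ x) →
    L.takeWhile (fun q => decide (q * q ≤ m)) = L.filter (fun q => decide (q * q ≤ m)) := by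
  intro L
  induction L with
  | nil => intro _ _; rfl
  | cons a l ih =>
    intro hpw h0
    rw [List.pairwise_cons] at hpw
    by_cases ha : a * a ≤ m
    · rw [List.takeWhile_cons_of_pos (by simpa using ha),
          List.filter_cons_of_pos (by simpa using ha)]
      rw [ih hpw.2 (fun x hx => h0 x (by simp [hx]))]
    · rw [List.takeWhile_cons_of_neg (by simpa using ha),
          List.filter_cons_of_neg (by simpa using ha)]
      rw [eq_comm, List.filter_eq_nil_iff]
      intro x hx
      have hax := hpw.1 x hx
      have h0a := h0 a (by simp)
      simp only [decide_eq_true_eq]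
      nlinarith

lemma psA_filter (m lo : Int) (h2 : 2 ≤ lo) :
    (psA m).filter (fun q => decide (lo ≤ q)) = canon m lo := by
  unfold psA ePrimes canon
  rw [tw_filter m _ ?_ ?_]
  · rw [List.filter_filter, List.filter_filter]
    apply List.filter_congr
    intro q hq
    rw [PySem.List.mem_pyRange_one] at hq
    have hmod : isEPrime q = decide (q % 4 = 2) := by
      rw [isEPrime, PySem.Int.mod_eq_emod_of_pos (by omega : (0:Int) < 4)]
      rw [Bool.eq_iff_iff]
      simp
    rw [hmod]
    by_cases hq4 : q % 4 = 2
    · rw [show decide (q % 4 = 2) = true from by simp [hq4]]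
      cases hlo : decide (lo ≤ q) <;> cases hsq : decide (q * q ≤ m) <;> simp
    · rw [show decide (q % 4 = 2) = false from by simp [hq4]]
      simp
  · exact List.Pairwise.filter _ (PySem.List.pairwise_lt_pyRange_one 0 m |>.imp le_of_lt)
  · intro x hx
    have := List.mem_filter.mp hx |>.1
    rw [PySem.List.mem_pyRange_one] at this
    omega
lemma flatMap_filter (f : Int → List (List Int)) (q : Int → Bool) :
    ∀ L : List Int, (L.filter q).flatMap f = L.flatMap (fun x => if q x then f x else []) := by
  intro L
  induction L with
  | nil => rfl
  | cons a l ih =>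
    by_cases ha : q a = true
    · rw [List.filter_cons_of_pos ha, List.flatMap_cons, List.flatMap_cons, if_pos ha, ih]
    · rw [List.filter_cons_of_neg (by simpa using ha), List.flatMap_cons,
        if_neg (by simpa using ha), List.nil_append, ih]

lemma filter_head (m lo : Int) (hm : isEPrime m = false) (h2 : 2 ≤ lo) :
    (e_factor m).filter (fun f => decide (lo ≤ f.headI)) = (canon m lo).flatMap (bodyB m) := by
  rw [e_factor_flat m hm, List.filter_flatMap, ← psA_filter m lo h2, flatMap_filter]
  congr 1
  funext p
  have hbody : (bodyB m p).filter (fun f => decide (lo ≤ f.headI)) =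
      if decide (lo ≤ p) then bodyB m p else [] := by
    unfold bodyB
    split
    · rw [List.filter_map]
      by_cases hlp : lo ≤ p
      · rw [if_pos (by simpa using hlp)]
        congr 1
        rw [List.filter_eq_self]
        intro fl _
        show decide (lo ≤ (p :: fl).headI) = true
        simpa using hlp
      · rw [if_neg (by simpa using hlp)]
        rw [List.map_eq_nil_iff, List.filter_eq_nil_iff]
        intro fl _
        show ¬ decide (lo ≤ (p :: fl).headI) = true
        simpa using hlp
    · simp
  rw [hbody]
lemma loop_eq (m : Int)
    (IH : ∀ m' (lo' : Int) h', m'.toNat < m.toNat →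
      genAlt m' lo' h' = (e_factor m').filter (fun f => decide (lo' ≤ f.headI))) :
    ∀ (k : Nat) (p : Int) (h : 2 ≤ p ∧ PySem.Int.mod p 4 = 2), m.toNat + 1 - p.toNat ≤ k →
      genAltLoop m p h = (canon m p).flatMap (bodyB m) := by
  intro k
  induction k with
  | zero =>
    intro p h hk
    obtain ⟨hp2, hp4⟩ := h
    rw [genAltLoop.eq_def]
    have hple : ¬ p * p ≤ m := by
      intro hle
      have : p ≤ m := by nlinarith
      omega
    rw [dif_neg hple]
    rw [canon_nil m p (by omega) (by omega), List.flatMap_nil]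
  | succ k ih =>
    intro p h hk
    obtain ⟨hp2, hp4⟩ := h
    have hp4' : p % 4 = 2 := by
      rw [PySem.Int.mod_eq_emod_of_pos (by omega)] at hp4; exact hp4
    rw [genAltLoop.eq_def]
    by_cases hle : p * p ≤ m
    · rw [dif_pos hle]
      rw [canon_cons m p hp2 hp4' hle, List.flatMap_cons]
      have htail : m.toNat + 1 - (p + 4).toNat ≤ k := by
        have : (p + 4).toNat = p.toNat + 4 := by omega
        omega
      rw [ih (p + 4) _ htail]
      congr 1
      by_cases hd : (PySem.Int.mod m p == 0) = true
      · rw [if_pos hd]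
        unfold bodyB
        rw [if_pos hd]
        congr 1
        apply IH
        have hm4 : 4 ≤ m := by nlinarith
        rw [PySem.Int.floordiv_eq_ediv_of_pos (by omega)]
        have := pv_fdiv_lt m p (by omega) hp2
        omega
      · rw [if_neg hd]
        unfold bodyB
        rw [if_neg hd]
    · rw [dif_neg hle]
      rw [canon_nil m p (by omega) (by omega), List.flatMap_nil]

lemma main_step (m lo : Int) (h : 2 ≤ lo ∧ PySem.Int.mod lo 4 = 2)
    (IH : ∀ m' (lo' : Int) h', m'.toNat < m.toNat →
      genAlt m' lo' h' = (e_factor m').filter (fun f => decide (lo' ≤ f.headI))) :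
    genAlt m lo h = (e_factor m).filter (fun f => decide (lo ≤ f.headI)) := by
  rw [genAlt.eq_def]
  by_cases hm : (PySem.Int.mod m 4 == 2) = true
  · rw [if_pos hm]
    have hE : isEPrime m = true := by simpa [isEPrime] using hm
    rw [e_factor.eq_def, if_pos hE]
    by_cases hlom : lo ≤ m
    · rw [if_pos hlom, List.filter_cons_of_pos (by simpa using hlom), List.filter_nil]
    · rw [if_neg hlom, List.filter_cons_of_neg (by simpa using hlom), List.filter_nil]
  · rw [if_neg hm]
    have hE : isEPrime m = false := by simpa [isEPrime] using hm
    rw [loop_eq m IH (m.toNat + 1) lo h (by omega)]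
    rw [filter_head m lo hE h.1]

lemma main_eq : ∀ (N : Nat) (m lo : Int) (h : 2 ≤ lo ∧ PySem.Int.mod lo 4 = 2), m.toNat ≤ N →
    genAlt m lo h = (e_factor m).filter (fun f => decide (lo ≤ f.headI)) := by
  intro N
  induction N with
  | zero =>
    intro m lo h hN
    have IH : ∀ m' (lo' : Int) h', m'.toNat < m.toNat →
        genAlt m' lo' h' = (e_factor m').filter (fun f => decide (lo' ≤ f.headI)) := by
      intro m' lo' h' hlt
      omega
    exact main_step m lo h IH
  | succ N ihN =>
    intro m lo h hN
    have IH : ∀ m' (lo' : Int) h', m'.toNat < m.toNat →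
        genAlt m' lo' h' = (e_factor m').filter (fun f => decide (lo' ≤ f.headI)) := by
      intro m' lo' h' hlt
      exact ihN m' lo' h' (by omega)
    exact main_step m lo h IH

-- ===== VERDICT (by name: the statement is the Claim_ definition above) =====
theorem e_factor_spec : Claim_equal_e_factor := by
  intro e _
  unfold Spec_e_factor e_factor_alt
  by_cases hp : e % 4 = 2
  · have h1 : isEPrime e = true := by simp [isEPrime, hp]
    rw [e_factor.eq_def, if_pos h1, if_pos (by simp [hp])]
  · have h1 : isEPrime e = false := by simp [isEPrime, hp]
    rw [if_neg (by simp [hp])]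
    rw [main_eq e.toNat e 2 _ (le_refl _)]
    rw [List.filter_eq_self.mpr]
    intro f hf
    rw [e_factor_flat e h1] at hf
    obtain ⟨p, hpmem, hfb⟩ := List.mem_flatMap.mp hf
    have hpm : p ∈ ePrimes e := List.Sublist.mem hpmem (List.takeWhile_sublist _)
    simp only [ePrimes, List.mem_filter, isEPrime, beq_iff_eq] at hpm
    obtain ⟨hr, hm4⟩ := hpm
    rw [PySem.List.mem_pyRange_one] at hr
    rw [PySem.Int.mod_eq_emod_of_pos (by omega)] at hm4
    unfold bodyB at hfb
    split at hfb
    · obtain ⟨fl, _, rfl⟩ := List.mem_map.mp hfb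
      simp only [List.headI, decide_eq_true_eq]
      omega
    · simp at hfb
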